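-- pv_equiv track=rewrite | github.com/Holedozer1229/Sphinx_OS | mrbeast/mr_beast.py | lagrange_interpolate
-- ===== SOURCE A (Python) =====
-- from typing import List, Optional, Tuple
--
-- def egcd(a: int, b: int) -> Tuple[int, int, int]:
--     if a == 0:
--         return (b, 0, 1)
--     g, y, x = egcd(b % a, a)
--     return (g, x - (b // a) * y, y)
--
-- def modinv(a: int, m: int) -> int:
--     g, x, _ = egcd(a, m)
--     if g != 1:
--         raise ValueError("modular inverse does not exist")
--     return x % m
--
-- def lagrange_interpolate(x_points: List[int], y_points: List[int], x: int, mod: int) -> int: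
--     """Lagrange interpolation at x=0 to recover secret."""
--     total = 0
--     n = len(x_points)
--     for i in range(n):
--         xi, yi = x_points[i], y_points[i]
--         num = 1
--         den = 1
--         for j in range(n):
--             if j == i:
--                 continue
--             xj = x_points[j]
--             num = (num * (x - xj)) % mod
--             den = (den * (xi - xj)) % mod
--         term = yi * num % mod * modinv(den, mod) % mod
--         total = (total + term) % mod
--     return total
-- ===== SOURCE B (Python) =====
-- from typing import List, Tuple
--
-- def egcd(a: int, b: int) -> Tuple[int, int, int]:
--     if a == 0:
--         return (b, 0, 1)
--     g, y, x = egcd(b % a, a)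
--     return (g, x - (b // a) * y, y)
--
-- def modinv(a: int, m: int) -> int:
--     g, x, _ = egcd(a, m)
--     if g != 1:
--         raise ValueError("modular inverse does not exist")
--     return x % m
--
-- def lagrange_interpolate(x_points: List[int], y_points: List[int], x: int, mod: int) -> int:
--     """Lagrange interpolation at x=0 to recover secret (prefix/suffix-product numerators)."""
--     n = len(x_points)
--     diffs = [(x - xj) % mod for xj in x_points]
--     pre = []
--     acc = 1
--     for d in diffs:
--         pre.append(acc)
--         acc = acc * d % mod
--     suf = []
--     acc = 1
--     for d in reversed(diffs):
--         suf.append(acc)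
--         acc = acc * d % mod
--     suf.reverse()
--     terms = []
--     for i in range(n):
--         den = 1
--         for j in range(n):
--             if j != i:
--                 den = den * (x_points[i] - x_points[j]) % mod
--         num = pre[i] * suf[i] % mod
--         terms.append(y_points[i] * num % mod * modinv(den, mod) % mod)
--     return sum(terms) % mod
-- ===== Notes on version B (the rewrite author's own statement) =====
-- stated objective: alternative
-- what changed: B precomputes all Lagrange numerators with one forward prefix-product sweep and one backward suffix-product sweep over the pre-reduced differences (x - xj) % mod, keeps the inherently quadratic denominator loop, collects the terms in a list and reduces their sum once at the end, instead of A's per-i inner loop that rebuilds the numerator and accumulates mod at every step.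
-- outside the precondition, e.g. on lagrange_interpolate([], [], 5, 0): A returns 0, B raises ZeroDivisionError
import Mathlib
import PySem

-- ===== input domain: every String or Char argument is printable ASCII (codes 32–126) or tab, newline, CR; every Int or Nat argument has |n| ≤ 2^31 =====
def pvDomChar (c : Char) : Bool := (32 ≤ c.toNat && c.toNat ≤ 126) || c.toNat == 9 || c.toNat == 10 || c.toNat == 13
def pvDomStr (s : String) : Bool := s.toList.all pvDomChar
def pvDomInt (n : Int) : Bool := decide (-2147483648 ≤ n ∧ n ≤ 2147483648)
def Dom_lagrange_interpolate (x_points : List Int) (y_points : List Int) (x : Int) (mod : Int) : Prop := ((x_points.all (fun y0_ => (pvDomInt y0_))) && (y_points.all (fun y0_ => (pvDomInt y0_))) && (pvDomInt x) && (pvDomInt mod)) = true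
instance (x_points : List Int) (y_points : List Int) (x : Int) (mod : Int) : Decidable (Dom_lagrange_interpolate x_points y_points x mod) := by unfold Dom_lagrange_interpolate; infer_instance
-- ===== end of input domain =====

-- B keeps A's Lagrange sum but computes all numerators by prefix/suffix product sweeps
-- over the pre-reduced differences and reduces the sum of the collected terms once at
-- the end (objective: alternative decomposition; denominators stay quadratic).

-- termination fact for the egcd recursion (cited by pvEgcd's decreasing_by)
theorem pvMod_natAbs_lt (b : Int) {a : Int} (h : a ≠ 0) :
    (PySem.Int.mod b a).natAbs < a.natAbs := by
  rcases lt_or_gt_of_ne h with hn | hp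
  · have := PySem.Int.mod_neg_bounds b hn
    omega
  · have h1 := PySem.Int.mod_nonneg b hp
    have h2 := PySem.Int.mod_lt b hp
    omega

-- shared module helper: egcd (recursive extended Euclid, exactly the Python)
def pvEgcd (a b : Int) : Int × Int × Int :=
  if h : a = 0 then (b, 0, 1)
  else
    match pvEgcd (PySem.Int.mod b a) a with
    | (g, y, x) => (g, x - PySem.Int.floordiv b a * y, y)
termination_by a.natAbs
decreasing_by exact pvMod_natAbs_lt b h

-- shared module helper: modinv; none = ValueError "modular inverse does not exist"
def pvModinv? (a m : Int) : Option Int :=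
  match pvEgcd a m with
  | (g, x, _) => if g ≠ 1 then none else some (PySem.Int.mod x m)

-- ===== PORT A =====
-- A's inner loop over j in range(n): one pass maintaining (num, den), skipping j == i
def pvInnerA (xs : List Int) (x mod xi i : Int) : Int × Int :=
  (PySem.List.pyRange 0 (xs.length : Int) 1).foldl
    (fun (p : Int × Int) j =>
      if j = i then p
      else
        match PySem.List.pyGet? xs j with
        | some xj => (PySem.Int.mod (p.1 * (x - xj)) mod, PySem.Int.mod (p.2 * (xi - xj)) mod)
        | none => p)
    (1, 1)

def lagrange_interpolate (x_points : List Int) (y_points : List Int) (x : Int) (mod : Int) : Int :=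
  ((PySem.List.pyRange 0 (x_points.length : Int) 1).foldl
    (fun (tot : Option Int) i => tot.bind (fun t =>
      match PySem.List.pyGet? x_points i, PySem.List.pyGet? y_points i with
      | some xi, some yi =>
        match pvInnerA x_points x mod xi i with
        | (num, den) =>
          match pvModinv? den mod with
          | some inv => some (PySem.Int.mod (t + PySem.Int.mod (PySem.Int.mod (yi * num) mod * inv) mod) mod)
          | none => none
      | _, _ => none))
    (some 0)).getD 0

-- ===== PORT B =====
-- the 'append acc; acc = acc * d % mod' sweep of Source B
def pvScanMod (mod : Int) (acc : Int) : List Int → List Int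
  | [] => []
  | d :: ds => acc :: pvScanMod mod (PySem.Int.mod (acc * d) mod) ds

-- Source B's denominator loop (index-skipping, unchanged from A's recipe)
def pvDenB (xs : List Int) (mod xi i : Int) : Int :=
  (PySem.List.pyRange 0 (xs.length : Int) 1).foldl
    (fun (d : Int) j =>
      if j ≠ i then
        (PySem.List.pyGet? xs j).elim d (fun xj => PySem.Int.mod (d * (xi - xj)) mod)
      else d)
    1

def lagrange_interpolate_alt (x_points : List Int) (y_points : List Int) (x : Int) (mod : Int) : Int :=
  let diffs := x_points.map (fun xj => PySem.Int.mod (x - xj) mod)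
  let pre := pvScanMod mod 1 diffs
  let suf := (pvScanMod mod 1 diffs.reverse).reverse
  let terms := (PySem.List.pyRange 0 (x_points.length : Int) 1).foldl
    (fun (ts : Option (List Int)) i => ts.bind (fun tl =>
      (PySem.List.pyGet? x_points i).bind (fun xi =>
      (PySem.List.pyGet? y_points i).bind (fun yi =>
      (PySem.List.pyGet? pre i).bind (fun p =>
      (PySem.List.pyGet? suf i).bind (fun s =>
      (pvModinv? (pvDenB x_points mod xi i) mod).map (fun inv =>
        tl ++ [PySem.Int.mod (PySem.Int.mod (yi * PySem.Int.mod (p * s) mod) mod * inv) mod])))))))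
    (some [])
  terms.elim 0 (fun ts => PySem.Int.mod ts.sum mod)

-- ===== PRECONDITION & SPEC =====
-- the exact Lagrange denominator ∏_{j≠i}(x_i − x_j), used only to state invertibility
def pvDenProd (xs : List Int) (i : Nat) : Int :=
  (((List.range xs.length).filter (fun j => j ≠ i)).map (fun j => xs.getD i 0 - xs.getD j 0)).prod

-- Pre_ is where A returns normally inside the natural domain: a nonzero modulus, a y-value for
-- every x-value, and (once there are two or more points, when denominators actually get reduced
-- mod mod) a positive modulus with every denominator invertible — elsewhere A raises ValueError /
-- IndexError / ZeroDivisionError, except for one degenerate corner outside the natural domain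
-- that Pre_ also excludes (no points with mod = 0, where A returns 0 but B raises
-- ZeroDivisionError — see claim.json cites).
def Pre_lagrange_interpolate (x_points : List Int) (y_points : List Int) (x : Int) (mod : Int) : Prop :=
  mod ≠ 0 ∧ x_points.length ≤ y_points.length ∧
    (2 ≤ x_points.length → 0 < mod ∧ ∀ i < x_points.length, Int.gcd (pvDenProd x_points i) mod = 1)

instance (x_points : List Int) (y_points : List Int) (x : Int) (mod : Int) : Decidable (Pre_lagrange_interpolate x_points y_points x mod) := by unfold Pre_lagrange_interpolate; infer_instance

def pvWitness_lagrange_interpolate : List Int × List Int × Int × Int := ([1, 2, 3], [5, 6, 2], 0, 7)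

def Spec_lagrange_interpolate (x_points : List Int) (y_points : List Int) (x : Int) (mod : Int) (out : Int) : Prop := out = lagrange_interpolate_alt x_points y_points x mod
instance (x_points : List Int) (y_points : List Int) (x : Int) (mod : Int) (out : Int) : Decidable (Spec_lagrange_interpolate x_points y_points x mod out) := by unfold Spec_lagrange_interpolate; infer_instance

-- ===== CLAIM (what is proved, stated in full; the proofs are below) =====
def Claim_equal_lagrange_interpolate : Prop := ∀ (x_points : List Int) (y_points : List Int) (x : Int) (mod : Int), Dom_lagrange_interpolate x_points y_points x mod → Pre_lagrange_interpolate x_points y_points x mod → Spec_lagrange_interpolate x_points y_points x mod (lagrange_interpolate x_points y_points x mod)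

-- ===== LEMMAS AND PROOFS =====

-- the slice of xs a range' of indices reads through getD
theorem pv_map_getD_range' (xs : List Int) (f : Int → Int) :
    ∀ (c s : Nat), s + c ≤ xs.length →
      (List.range' s c).map (fun j => f (xs.getD j 0)) = ((xs.drop s).take c).map f := by
  intro c
  induction c with
  | zero => intro s _; simp
  | succ c ih =>
    intro s hs
    have hslt : s < xs.length := by omega
    rw [List.range'_succ, List.drop_eq_getElem_cons hslt]
    simp only [List.map_cons, List.take_succ_cons, List.getD_eq_getElem xs 0 hslt]
    congr 1
    have := ih (s + 1) (by omega)
    simpa using this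

theorem pv_range_filter (n k : Nat) (hk : k < n) :
    (List.range n).filter (fun j => decide (j ≠ k)) = List.range k ++ List.range' (k+1) (n-k-1) := by
  have h1 : List.range n = List.range' 0 k ++ List.range' k (n - k) := by
    rw [List.range_eq_range']
    have h := List.range'_append (s := 0) (m := k) (n := n - k) (step := 1)
    simp only [one_mul, Nat.zero_add] at h
    rw [h]
    congr 1
    omega
  have h2 : List.range' k (n - k) = k :: List.range' (k+1) (n-k-1) := by
    have h3 : n - k = (n - k - 1) + 1 := by omega
    rw [h3, List.range'_succ]
    norm_num
  rw [h1, h2, List.filter_append]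
  congr 1
  · rw [List.filter_eq_self.mpr]
    · exact (List.range_eq_range' (n := k)).symm
    · intro a ha
      simp only [List.mem_range'] at ha
      simp
      omega
  · rw [List.filter_cons_of_neg (by simp)]
    rw [List.filter_eq_self.mpr]
    intro a ha
    simp only [List.mem_range'] at ha
    simp
    omega

-- the common skip-index fold: value = reduced product over all j ≠ k
theorem pv_skip_fold_aux {m : Int} (hm : 2 ≤ m) (xs : List Int) (f : Int → Int) (k : Nat) :
    ∀ (l : List Nat) (a : Int), (∀ j ∈ l, j < xs.length) →
      l.foldl (fun d j => if j = k then d else PySem.Int.mod (d * f (xs.getD j 0)) m) (a % m)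
        = (a * ((l.filter (fun j => decide (j ≠ k))).map (fun j => f (xs.getD j 0))).prod) % m := by
  intro l
  induction l with
  | nil => intro a _; simp
  | cons e l ih =>
    intro a hl
    by_cases he : e = k
    · subst he
      simp only [List.foldl_cons]
      rw [List.filter_cons_of_neg (by simp)]
      exact ih a (fun j hj => hl j (List.mem_cons_of_mem _ hj))
    · have h1 : PySem.Int.mod (a % m * f (xs.getD e 0)) m = (a * f (xs.getD e 0)) % m := by
        rw [PySem.Int.mod_eq_emod_of_pos (by omega), Int.mul_emod, Int.emod_emod_of_dvd _ dvd_rfl,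
          ← Int.mul_emod]
      simp only [List.foldl_cons, if_neg he, h1]
      rw [ih _ (fun j hj => hl j (List.mem_cons_of_mem _ hj))]
      rw [List.filter_cons_of_pos (by simpa using he)]
      simp only [List.map_cons, List.prod_cons]
      ring_nf

-- the fold over pyRange with pyGet? equals the clean Nat fold
theorem pv_skip_fold {m : Int} (hm : 2 ≤ m) (xs : List Int) (f : Int → Int) (k : Nat)
    (hk : k < xs.length) :
    (PySem.List.pyRange 0 (xs.length : Int) 1).foldl
      (fun (d : Int) j =>
        if j = (k : Int) then d
        else
          match PySem.List.pyGet? xs j with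
          | some xj => PySem.Int.mod (d * f xj) m
          | none => d)
      1
    = (((xs.take k).map f).prod * ((xs.drop (k+1)).map f).prod) % m := by
  rw [PySem.List.pyRange_zero_natCast, List.foldl_map]
  have hcongr : (List.range xs.length).foldl
      (fun (d : Int) (j : Nat) =>
        if (j : Int) = (k : Int) then d
        else
          match PySem.List.pyGet? xs (j : Int) with
          | some xj => PySem.Int.mod (d * f xj) m
          | none => d)
      1
    = (List.range xs.length).foldl
      (fun (d : Int) (j : Nat) => if j = k then d else PySem.Int.mod (d * f (xs.getD j 0)) m) 1 := by
    apply PySem.List.foldl_congr_mem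
    intro acc j hj
    have hjlt : j < xs.length := List.mem_range.mp hj
    rw [PySem.List.pyGet?_natCast, List.getElem?_eq_getElem hjlt]
    simp only [Int.natCast_inj, List.getD_eq_getElem xs 0 hjlt]
  rw [hcongr]
  have h1 : (1 : Int) = 1 % m := by
    rw [Int.emod_eq_of_lt (by omega) (by omega)]
  rw [h1, pv_skip_fold_aux hm xs f k (List.range xs.length) 1 (fun j hj => List.mem_range.mp hj)]
  rw [pv_range_filter _ k hk, List.map_append, List.prod_append, one_mul]
  have t1 := pv_map_getD_range' xs f k 0 (by omega)
  have t2 := pv_map_getD_range' xs f (xs.length - k - 1) (k + 1) (by omega)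
  rw [List.range_eq_range', t1, t2, List.drop_zero,
    List.take_of_length_le (l := xs.drop (k+1)) (by simp; omega)]

-- A's pair fold splits into the two clean products
theorem pv_innerA_eq {m : Int} (hm : 2 ≤ m) (xs : List Int) (x xi : Int) (k : Nat)
    (hk : k < xs.length) :
    pvInnerA xs x m xi (k : Int)
      = ((((xs.take k).map (fun xj => x - xj)).prod * ((xs.drop (k+1)).map (fun xj => x - xj)).prod) % m,
         (((xs.take k).map (fun xj => xi - xj)).prod * ((xs.drop (k+1)).map (fun xj => xi - xj)).prod) % m) := by
  unfold pvInnerA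
  have hsplit : (PySem.List.pyRange 0 (xs.length : Int) 1).foldl
      (fun (p : Int × Int) j =>
        if j = (k : Int) then p
        else
          match PySem.List.pyGet? xs j with
          | some xj => (PySem.Int.mod (p.1 * (x - xj)) m, PySem.Int.mod (p.2 * (xi - xj)) m)
          | none => p)
      (1, 1)
    = (PySem.List.pyRange 0 (xs.length : Int) 1).foldl
      (fun (p : Int × Int) j =>
        ((fun (d : Int) j => if j = (k : Int) then d else
            match PySem.List.pyGet? xs j with
            | some xj => PySem.Int.mod (d * (x - xj)) m
            | none => d) p.1 j,
         (fun (d : Int) j => if j = (k : Int) then d else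
            match PySem.List.pyGet? xs j with
            | some xj => PySem.Int.mod (d * (xi - xj)) m
            | none => d) p.2 j))
      (1, 1) := by
    apply PySem.List.foldl_congr_mem
    intro acc j _
    by_cases hj : j = (k : Int)
    · simp [hj]
    · simp only [if_neg hj]
      cases PySem.List.pyGet? xs j <;> simp
  have hmk := PySem.List.foldl_prod_mk
    (f := fun (d : Int) (j : Int) => if j = (k : Int) then d else
      match PySem.List.pyGet? xs j with
      | some xj => PySem.Int.mod (d * (x - xj)) m
      | none => d)
    (g := fun (d : Int) (j : Int) => if j = (k : Int) then d else
      match PySem.List.pyGet? xs j with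
      | some xj => PySem.Int.mod (d * (xi - xj)) m
      | none => d)
    (l := PySem.List.pyRange 0 (xs.length : Int) 1) (a := 1) (b := 1)
  rw [hsplit, hmk, pv_skip_fold hm xs (fun xj => x - xj) k hk, pv_skip_fold hm xs (fun xj => xi - xj) k hk]

-- B's denominator fold is the same skip fold
theorem pv_denB_eq {m : Int} (hm : 2 ≤ m) (xs : List Int) (xi : Int) (k : Nat)
    (hk : k < xs.length) :
    pvDenB xs m xi (k : Int)
      = (((xs.take k).map (fun xj => xi - xj)).prod * ((xs.drop (k+1)).map (fun xj => xi - xj)).prod) % m := by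
  unfold pvDenB
  rw [← pv_skip_fold hm xs (fun xj => xi - xj) k hk]
  apply PySem.List.foldl_congr_mem
  intro acc j _
  by_cases hj : j = (k : Int)
  · simp [hj]
  · cases PySem.List.pyGet? xs j <;> simp [hj]

theorem pv_scanMod_length (m : Int) : ∀ (l : List Int) (a : Int), (pvScanMod m a l).length = l.length := by
  intro l
  induction l with
  | nil => intro a; rfl
  | cons d ds ih => intro a; simp [pvScanMod, ih]

-- the scan's i-th entry is the reduced product of the first i inputs
theorem pv_scanMod_get? {m : Int} (hm : 2 ≤ m) :
    ∀ (l : List Int) (a : Int) (i : Nat), i < l.length →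
      (pvScanMod m (a % m) l)[i]? = some ((a * (l.take i).prod) % m) := by
  intro l
  induction l with
  | nil => intro a i hi; simp at hi
  | cons d ds ih =>
    intro a i hi
    cases i with
    | zero => simp [pvScanMod]
    | succ i =>
      have h1 : PySem.Int.mod (a % m * d) m = (a * d) % m := by
        rw [PySem.Int.mod_eq_emod_of_pos (by omega), Int.mul_emod, Int.emod_emod_of_dvd _ dvd_rfl,
          ← Int.mul_emod]
      have h2 := ih (a * d) i (by simpa using hi)
      simp only [pvScanMod, h1, List.getElem?_cons_succ, h2, List.take_succ_cons, List.prod_cons]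
      ring_nf

-- reduced factors inside, reduced once outside: same thing
theorem pv_prod_map_mod {m : Int} (hm : 2 ≤ m) (l : List Int) :
    ((l.map (fun y => PySem.Int.mod y m)).prod) % m = l.prod % m := by
  induction l with
  | nil => simp
  | cons d ds ih =>
    simp only [List.map_cons, List.prod_cons]
    rw [Int.mul_emod, PySem.Int.mod_eq_emod_of_pos (by omega : (0:Int) < m),
      Int.emod_emod_of_dvd _ dvd_rfl, ih, ← Int.mul_emod, Int.mul_emod d, ← Int.mul_emod]

theorem pv_foldl_none {A B : Type} (f : Option B → A → Option B) (hf : ∀ a, f none a = none)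
    (l : List A) : l.foldl f none = none := by
  induction l with
  | nil => rfl
  | cons a l ih => simp only [List.foldl_cons, hf a]; exact ih

-- pre[i] is the reduced prefix product of the (x - xj)
theorem pv_pre_get {xs : List Int} {x m : Int} (hm : 2 ≤ m) (k : Nat) (hk : k < xs.length) :
    PySem.List.pyGet? (pvScanMod m 1 (xs.map (fun xj => PySem.Int.mod (x - xj) m))) (k : Int)
      = some (((xs.take k).map (fun xj => x - xj)).prod % m) := by
  rw [PySem.List.pyGet?_natCast]
  have h1 : (1 : Int) = 1 % m := (Int.emod_eq_of_lt (by omega) (by omega)).symm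
  rw [h1, pv_scanMod_get? hm _ 1 k (by simpa using hk), one_mul, ← List.map_take]
  have h3 : (xs.take k).map (fun xj => PySem.Int.mod (x - xj) m)
      = ((xs.take k).map (fun xj => x - xj)).map (fun y => PySem.Int.mod y m) := by
    simp [List.map_map]; rfl
  rw [h3, pv_prod_map_mod hm]

-- suf[i] is the reduced suffix product of the (x - xj)
theorem pv_suf_get {xs : List Int} {x m : Int} (hm : 2 ≤ m) (k : Nat) (hk : k < xs.length) :
    PySem.List.pyGet? ((pvScanMod m 1 (xs.map (fun xj => PySem.Int.mod (x - xj) m)).reverse).reverse) (k : Int)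
      = some (((xs.drop (k+1)).map (fun xj => x - xj)).prod % m) := by
  rw [PySem.List.pyGet?_natCast]
  set diffs := xs.map (fun xj => PySem.Int.mod (x - xj) m) with hdiffs
  have hd : diffs.length = xs.length := by simp [hdiffs]
  have hk1 : k < (pvScanMod m 1 diffs.reverse).length := by
    rw [pv_scanMod_length, List.length_reverse, hd]; exact hk
  rw [List.getElem?_reverse hk1]
  have h1 : (1 : Int) = 1 % m := (Int.emod_eq_of_lt (by omega) (by omega)).symm
  have hix : (pvScanMod m 1 diffs.reverse).length - 1 - k = xs.length - 1 - k := by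
    rw [pv_scanMod_length, List.length_reverse, hd]
  rw [hix, h1, pv_scanMod_get? hm diffs.reverse 1 (xs.length - 1 - k) (by simp [hd]; omega), one_mul]
  have h3 : diffs.reverse.take (xs.length - 1 - k) = (diffs.drop (k+1)).reverse := by
    rw [List.take_reverse]
    congr 2
    rw [hd]
    omega
  rw [h3, List.prod_reverse, hdiffs, ← List.map_drop]
  have h4 : (xs.drop (k+1)).map (fun xj => PySem.Int.mod (x - xj) m)
      = ((xs.drop (k+1)).map (fun xj => x - xj)).map (fun y => PySem.Int.mod y m) := by
    simp [List.map_map]; rfl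
  rw [h4, pv_prod_map_mod hm]

-- ===== the main outer-loop relation =====

theorem pv_outer_rel {xs ys : List Int} {x m : Int} (hm : 2 ≤ m) (hlen : xs.length ≤ ys.length) :
    ∀ (l : List Nat), (∀ j ∈ l, j < xs.length) → ∀ (ts : List Int),
      ((List.map (fun (k : Nat) => (k : Int)) l).foldl
        (fun (tot : Option Int) i => tot.bind (fun t =>
          match PySem.List.pyGet? xs i, PySem.List.pyGet? ys i with
          | some xi, some yi =>
            match pvInnerA xs x m xi i with
            | (num, den) =>
              match pvModinv? den m with
              | some inv => some (PySem.Int.mod (t + PySem.Int.mod (PySem.Int.mod (yi * num) m * inv) m) m)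
              | none => none
          | _, _ => none))
        (some (ts.sum % m))).getD 0
      = ((List.map (fun (k : Nat) => (k : Int)) l).foldl
          (fun (tso : Option (List Int)) i => tso.bind (fun tl =>
            (PySem.List.pyGet? xs i).bind (fun xi =>
            (PySem.List.pyGet? ys i).bind (fun yi =>
            (PySem.List.pyGet? (pvScanMod m 1 (xs.map (fun xj => PySem.Int.mod (x - xj) m))) i).bind (fun p =>
            (PySem.List.pyGet? ((pvScanMod m 1 (xs.map (fun xj => PySem.Int.mod (x - xj) m)).reverse).reverse) i).bind (fun s =>
            (pvModinv? (pvDenB xs m xi i) m).map (fun inv =>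
              tl ++ [PySem.Int.mod (PySem.Int.mod (yi * PySem.Int.mod (p * s) m) m * inv) m])))))))
          (some ts)).elim 0 (fun tl => PySem.Int.mod tl.sum m) := by
  intro l
  induction l with
  | nil =>
    intro _ ts
    simp [PySem.Int.mod_eq_emod_of_pos (show (0:Int) < m by omega)]
  | cons k l ih =>
    intro hl ts
    have hk : k < xs.length := hl k List.mem_cons_self
    have hky : k < ys.length := lt_of_lt_of_le hk hlen
    simp only [List.map_cons, List.foldl_cons, Option.bind_some]
    rw [PySem.List.pyGet?_natCast xs k, List.getElem?_eq_getElem hk,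
      PySem.List.pyGet?_natCast ys k, List.getElem?_eq_getElem hky,
      pv_pre_get hm k hk, pv_suf_get hm k hk]
    simp only [Option.bind_some]
    rw [pv_innerA_eq hm xs x (xs[k]) k hk]
    simp only []
    rw [pv_denB_eq hm xs (xs[k]) k hk]
    have hnum : PySem.Int.mod
        ((((xs.take k).map (fun xj => x - xj)).prod % m) * (((xs.drop (k+1)).map (fun xj => x - xj)).prod % m)) m
        = (((xs.take k).map (fun xj => x - xj)).prod * ((xs.drop (k+1)).map (fun xj => x - xj)).prod) % m := by
      rw [PySem.Int.mod_eq_emod_of_pos (by omega), ← Int.mul_emod]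
    simp only [hnum]
    cases hmi : pvModinv?
        ((((xs.take k).map (fun xj => xs[k] - xj)).prod * ((xs.drop (k+1)).map (fun xj => xs[k] - xj)).prod) % m) m with
    | none =>
      simp only [Option.map_none]
      rw [pv_foldl_none _ (fun _ => rfl), pv_foldl_none _ (fun _ => rfl)]
      simp
    | some inv =>
      simp only [Option.map_some]
      have hsum : PySem.Int.mod (ts.sum % m
            + PySem.Int.mod (PySem.Int.mod (ys[k] * ((((xs.take k).map (fun xj => x - xj)).prod * ((xs.drop (k+1)).map (fun xj => x - xj)).prod) % m)) m * inv) m) m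
          = (ts ++ [PySem.Int.mod (PySem.Int.mod (ys[k] * ((((xs.take k).map (fun xj => x - xj)).prod * ((xs.drop (k+1)).map (fun xj => x - xj)).prod) % m)) m * inv) m]).sum % m := by
        rw [PySem.Int.mod_eq_emod_of_pos (by omega)]
        rw [List.sum_append, List.sum_cons, List.sum_nil, add_zero, Int.emod_add_emod]
      rw [hsum]
      exact ih (fun j hj => hl j (List.mem_cons_of_mem _ hj)) _

-- ===== the degenerate cases n ≤ 1, any nonzero modulus =====

theorem pv_pyGet?_zero {A : Type} (a : A) (l : List A) : PySem.List.pyGet? (a :: l) 0 = some a := by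
  have h := PySem.List.pyGet?_natCast (a :: l) 0
  simp only [Nat.cast_zero, List.getElem?_cons_zero] at h
  exact h

theorem pv_dvd_mod_sub (m a : Int) : m ∣ PySem.Int.mod a m - a := by
  refine ⟨-(PySem.Int.floordiv a m), ?_⟩
  have h := PySem.Int.floordiv_mul_add_mod a m
  linear_combination h

-- Python's % respects congruence mod m, for either sign of m
theorem pv_mod_congr {m a b : Int} (hm : m ≠ 0) (h : m ∣ a - b) :
    PySem.Int.mod a m = PySem.Int.mod b m := by
  have hd : m ∣ (PySem.Int.mod a m - PySem.Int.mod b m) := by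
    have heq : PySem.Int.mod a m - PySem.Int.mod b m
        = (a - b) - (PySem.Int.floordiv a m - PySem.Int.floordiv b m) * m := by
      have ha := PySem.Int.floordiv_mul_add_mod a m
      have hb := PySem.Int.floordiv_mul_add_mod b m
      ring_nf
      omega
    rw [heq]
    exact dvd_sub h (Dvd.intro_left _ rfl)
  rcases hd with ⟨c, hc⟩
  rcases lt_or_gt_of_ne hm with hneg | hpos
  · have b1 := PySem.Int.mod_neg_bounds a hneg
    have b2 := PySem.Int.mod_neg_bounds b hneg
    have hc0 : c = 0 := by nlinarith [hc]
    rw [hc0, mul_zero] at hc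
    omega
  · have b1 := PySem.Int.mod_nonneg a hpos
    have b2 := PySem.Int.mod_lt a hpos
    have b3 := PySem.Int.mod_nonneg b hpos
    have b4 := PySem.Int.mod_lt b hpos
    have hc0 : c = 0 := by nlinarith [hc]
    rw [hc0, mul_zero] at hc
    omega

theorem pv_modinv_one (m : Int) : pvModinv? 1 m = some (PySem.Int.mod 1 m) := by
  have h0 : PySem.Int.mod m 1 = 0 := (PySem.Int.mod_eq_zero_iff_dvd m 1).mpr (one_dvd m)
  unfold pvModinv? pvEgcd
  rw [h0]
  unfold pvEgcd
  norm_num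

theorem pv_case_nil (ys : List Int) (x m : Int) :
    lagrange_interpolate [] ys x m = lagrange_interpolate_alt [] ys x m := by
  unfold lagrange_interpolate lagrange_interpolate_alt
  simp [pvScanMod, (PySem.Int.mod_eq_zero_iff_dvd 0 m).mpr (dvd_zero m)]

theorem pv_case_one (x0 y0 : Int) (yt : List Int) (x m : Int) (hm0 : m ≠ 0) :
    lagrange_interpolate [x0] (y0 :: yt) x m = lagrange_interpolate_alt [x0] (y0 :: yt) x m := by
  unfold lagrange_interpolate lagrange_interpolate_alt pvInnerA pvDenB
  simp only [List.length_cons, List.length_nil, Nat.cast_one, zero_add]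
  rw [show PySem.List.pyRange 0 (1:Int) 1 = [0] from by decide]
  simp only [List.foldl_cons, List.foldl_nil, Option.bind_some]
  rw [pv_pyGet?_zero x0, pv_pyGet?_zero y0]
  simp only [if_true, List.map_cons, List.map_nil, pvScanMod, List.reverse_cons,
    List.reverse_nil, List.nil_append, pv_pyGet?_zero, Option.bind_some, pv_modinv_one,
    Option.elim_some, Option.getD_some, zero_add, one_mul, mul_one]
  rw [if_neg (by norm_num : ¬ ((0:Int) ≠ 0))]
  simp only [pv_modinv_one, Option.map_some, Option.elim_some, List.sum_cons, List.sum_nil, add_zero]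
  set X := y0 * PySem.Int.mod 1 m with hX
  have hidem : ∀ a : Int, PySem.Int.mod (PySem.Int.mod a m) m = PySem.Int.mod a m :=
    fun a => pv_mod_congr hm0 (pv_dvd_mod_sub m a)
  rw [hidem, hidem]
  apply pv_mod_congr hm0
  have d1 := pv_dvd_mod_sub m y0
  have d2 := pv_dvd_mod_sub m X
  have d3 : m ∣ X - y0 := by
    have h1 : m ∣ y0 * (PySem.Int.mod 1 m - 1) := (pv_dvd_mod_sub m 1).mul_left y0
    have h2 : X - y0 = y0 * (PySem.Int.mod 1 m - 1) := by rw [hX]; ring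
    rw [h2]; exact h1
  have hmain : m ∣ PySem.Int.mod y0 m - PySem.Int.mod X m := by
    have h2 : PySem.Int.mod y0 m - PySem.Int.mod X m
        = (PySem.Int.mod y0 m - y0) - ((PySem.Int.mod X m - X) + (X - y0)) := by ring
    rw [h2]
    exact dvd_sub d1 (dvd_add d2 d3)
  have h3 : PySem.Int.mod y0 m * PySem.Int.mod 1 m - PySem.Int.mod X m * PySem.Int.mod 1 m
      = (PySem.Int.mod y0 m - PySem.Int.mod X m) * PySem.Int.mod 1 m := by ring
  rw [h3]
  exact hmain.mul_right _

-- ===== the degenerate modulus mod = 1: everything reduces to 0 =====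

theorem pvA_fold_mod_one (xs ys : List Int) (x : Int) :
    ∀ (l : List Int) (o : Option Int), (o = some 0 ∨ o = none) →
      (l.foldl
        (fun (tot : Option Int) i => tot.bind (fun t =>
          match PySem.List.pyGet? xs i, PySem.List.pyGet? ys i with
          | some xi, some yi =>
            match pvInnerA xs x 1 xi i with
            | (num, den) =>
              match pvModinv? den 1 with
              | some inv => some (PySem.Int.mod (t + PySem.Int.mod (PySem.Int.mod (yi * num) 1 * inv) 1) 1)
              | none => none
          | _, _ => none))
        o = some 0
      ∨ l.foldl
        (fun (tot : Option Int) i => tot.bind (fun t =>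
          match PySem.List.pyGet? xs i, PySem.List.pyGet? ys i with
          | some xi, some yi =>
            match pvInnerA xs x 1 xi i with
            | (num, den) =>
              match pvModinv? den 1 with
              | some inv => some (PySem.Int.mod (t + PySem.Int.mod (PySem.Int.mod (yi * num) 1 * inv) 1) 1)
              | none => none
          | _, _ => none))
        o = none) := by
  intro l
  induction l with
  | nil => intro o h; simpa using h
  | cons i l ih =>
    intro o h
    simp only [List.foldl_cons]
    apply ih
    rcases h with h | h
    · subst h
      simp only [Option.bind_some]
      cases PySem.List.pyGet? xs i with
      | none => right; rfl
      | some xi =>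
        cases PySem.List.pyGet? ys i with
        | none => right; rfl
        | some yi =>
          simp only []
          cases pvModinv? (pvInnerA xs x 1 xi i).2 1 with
          | none => right; rfl
          | some inv => left; simp
    · subst h
      right; rfl

theorem pv_elim_mod_one (o : Option (List Int)) :
    o.elim 0 (fun ts => PySem.Int.mod ts.sum 1) = 0 := by
  cases o <;> simp

theorem pv_case_mod_one (xs ys : List Int) (x : Int) :
    lagrange_interpolate xs ys x 1 = lagrange_interpolate_alt xs ys x 1 := by
  unfold lagrange_interpolate lagrange_interpolate_alt
  rw [pv_elim_mod_one]
  rcases pvA_fold_mod_one xs ys x (PySem.List.pyRange 0 (xs.length : Int) 1) (some 0) (Or.inl rfl)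
    with h | h <;> rw [h] <;> rfl

-- ===== VERDICT (by name: the statement is the Claim_ definition above) =====
theorem lagrange_interpolate_spec : Claim_equal_lagrange_interpolate := by
  intro xs ys x m _ hpre
  obtain ⟨hm0, hlen, hbig⟩ := hpre
  unfold Spec_lagrange_interpolate
  by_cases hm2 : 2 ≤ m
  · unfold lagrange_interpolate lagrange_interpolate_alt
    have h0 : (some (0 : Int)) = some (([] : List Int).sum % m) := by simp
    rw [PySem.List.pyRange_zero_natCast, h0]
    have := pv_outer_rel (x := x) hm2 hlen (List.range xs.length)
      (fun j hj => List.mem_range.mp hj) []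
    simpa using this
  · by_cases hm1 : m = 1
    · subst hm1
      exact pv_case_mod_one xs ys x
    have hn1 : xs.length ≤ 1 := by
      by_contra hgt
      have := (hbig (by omega)).1
      omega
    rcases xs with _ | ⟨x0, _ | ⟨x1, tl⟩⟩
    · exact pv_case_nil ys x m
    · rcases ys with _ | ⟨y0, yt⟩
      · simp at hlen
      · exact pv_case_one x0 y0 yt x m hm0
    · exact absurd hn1 (by simp)
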